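-- pv_equiv track=rewrite | github.com/Nao-desu/sv_plugin | info.py | hashToID
-- ===== SOURCE A (Python) =====
-- def hashToID(hash:str) -> int:
--     """
--     卡牌哈希值转id
--     """
--     id = 0
--     for i in range(len(hash)):
--         if '0' <= hash[i] and hash[i] <= '9':
--             id = id * 64 + ord(hash[i]) - ord('0')
--         if 'A' <= hash[i] and hash[i] <= 'Z':
--             id = id * 64 + ord(hash[i]) - ord('A') + 10
--         if 'a' <= hash[i] and hash[i] <= 'z':
--             id = id * 64 + ord(hash[i]) - ord('a') + 36
--         if hash[i] == '-':
--             id = id * 64 + 62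
--         if hash[i] == '_':
--             id = id * 64 + 63
--     return id
-- ===== SOURCE B (Python) =====
-- def _digit(c):
--     if '0' <= c <= '9':
--         return ord(c) - ord('0')
--     elif 'A' <= c <= 'Z':
--         return ord(c) - ord('A') + 10
--     elif 'a' <= c <= 'z':
--         return ord(c) - ord('a') + 36
--     elif c == '-':
--         return 62
--     elif c == '_':
--         return 63
--     else:
--         return None
--
-- def hashToID(hash: str) -> int:
--     values = [d for d in map(_digit, hash) if d is not None]
--     total = 0
--     power = 1
--     for v in reversed(values):
--         total += v * power
--         power *= 64
--     return total
-- ===== Notes on version B (the rewrite author's own statement) =====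
-- stated objective: alternative
-- what changed: A folds left-to-right with an in-place Horner accumulation inside five chained range tests; B first collects the base-64 digit values in one pass and then sums them back-to-front as a positional sum with an explicit power-of-64 accumulator.
import Mathlib
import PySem

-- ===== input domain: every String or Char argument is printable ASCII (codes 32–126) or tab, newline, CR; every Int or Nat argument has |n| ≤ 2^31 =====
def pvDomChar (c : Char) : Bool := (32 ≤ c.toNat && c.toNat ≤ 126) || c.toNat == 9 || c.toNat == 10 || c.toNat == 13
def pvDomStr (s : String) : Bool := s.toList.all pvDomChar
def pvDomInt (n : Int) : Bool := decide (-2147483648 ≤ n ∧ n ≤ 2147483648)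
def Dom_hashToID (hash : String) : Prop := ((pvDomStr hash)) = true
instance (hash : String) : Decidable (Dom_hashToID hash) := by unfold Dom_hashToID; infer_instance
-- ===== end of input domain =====

-- B replaces A's in-place Horner accumulation (five sequential ifs updating id) by a
-- collect-then-weighted-positional-sum decomposition (objective: alternative, same cost).

-- ===== PORT A =====
-- one iteration of A's loop body: five successive non-exclusive ifs reassigning id
def stepA (id : Int) (c : Char) : Int :=
  let id := if '0' ≤ c ∧ c ≤ '9' then id * 64 + (c.toNat : Int) - 48 else id
  let id := if 'A' ≤ c ∧ c ≤ 'Z' then id * 64 + (c.toNat : Int) - 65 + 10 else id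
  let id := if 'a' ≤ c ∧ c ≤ 'z' then id * 64 + (c.toNat : Int) - 97 + 36 else id
  let id := if c = '-' then id * 64 + 62 else id
  let id := if c = '_' then id * 64 + 63 else id
  id

def hashToID (hash : String) : Int :=
  hash.toList.foldl stepA 0

-- ===== PORT B =====
-- _digit from Source B: the base-64 digit value of a character, none for other characters
def digit? (c : Char) : Option Int :=
  if '0' ≤ c ∧ c ≤ '9' then some ((c.toNat : Int) - 48)
  else if 'A' ≤ c ∧ c ≤ 'Z' then some ((c.toNat : Int) - 65 + 10)
  else if 'a' ≤ c ∧ c ≤ 'z' then some ((c.toNat : Int) - 97 + 36)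
  else if c = '-' then some 62
  else if c = '_' then some 63
  else none

def hashToID_alt (hash : String) : Int :=
  let values := hash.toList.filterMap digit?
  let r := values.reverse.foldl (fun (s : Int × Int) v => (s.1 + v * s.2, s.2 * 64)) (0, 1)
  r.1

-- ===== PRECONDITION & SPEC =====
def Spec_hashToID (hash : String) (out : Int) : Prop := out = hashToID_alt hash
instance (hash : String) (out : Int) : Decidable (Spec_hashToID hash out) := by unfold Spec_hashToID; infer_instance

-- ===== CLAIM (what is proved, stated in full; the proofs are below) =====
def Claim_equal_hashToID : Prop := ∀ (hash : String), Dom_hashToID hash → Spec_hashToID hash (hashToID hash)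

-- ===== LEMMAS AND PROOFS =====

-- W vs = the weighted positional sum of a value list, recursively
def W : List Int → Int
  | [] => 0
  | v :: t => v * (64 : Int) ^ t.length + W t

theorem charLe (a c : Char) : (a ≤ c) ↔ (a.toNat ≤ c.toNat) := Iff.rfl

theorem charEq (a c : Char) : (a = c) ↔ (a.toNat = c.toNat) := by
  constructor
  · intro h; rw [h]
  · intro h; exact Char.ext (UInt32.toNat_inj.mp h)

theorem stepA_some (id : Int) (c : Char) (v : Int) (h : digit? c = some v) :
    stepA id c = id * 64 + v := by
  unfold digit? at h
  unfold stepA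
  split_ifs at h ⊢ <;>
    (simp only [Option.some.injEq] at h;
     simp only [charLe, charEq, show '0'.toNat = 48 from rfl, show '9'.toNat = 57 from rfl,
       show 'A'.toNat = 65 from rfl, show 'Z'.toNat = 90 from rfl,
       show 'a'.toNat = 97 from rfl, show 'z'.toNat = 122 from rfl,
       show '-'.toNat = 45 from rfl, show '_'.toNat = 95 from rfl] at *;
     omega)

theorem stepA_none (id : Int) (c : Char) (h : digit? c = none) :
    stepA id c = id := by
  unfold digit? at h
  unfold stepA
  split_ifs at h ⊢
  all_goals simp_all

-- V l = sum of l[i] * 64^i (value of l read little-endian)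
def V : List Int → Int
  | [] => 0
  | v :: t => v + 64 * V t

theorem revfold_eq (l : List Int) (t p : Int) :
    (l.foldl (fun (s : Int × Int) v => (s.1 + v * s.2, s.2 * 64)) (t, p)).1 = t + p * V l := by
  induction l generalizing t p with
  | nil => simp [V]
  | cons v l ih =>
    rw [List.foldl_cons, ih, V]
    ring

theorem V_append_singleton (l : List Int) (v : Int) :
    V (l ++ [v]) = V l + v * (64 : Int) ^ l.length := by
  induction l with
  | nil => simp [V]
  | cons w l ih =>
    simp only [List.cons_append, V, ih, List.length_cons]
    ring

theorem W_eq_V_reverse (vs : List Int) : W vs = V vs.reverse := by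
  induction vs with
  | nil => rfl
  | cons v t ih =>
    simp only [W, List.reverse_cons, V_append_singleton, List.length_reverse, ih]
    ring

theorem foldl_stepA_eq (l : List Char) (acc : Int) :
    l.foldl stepA acc = acc * (64 : Int) ^ (l.filterMap digit?).length + W (l.filterMap digit?) := by
  induction l generalizing acc with
  | nil => simp [W]
  | cons c t ih =>
    rw [List.foldl_cons]
    cases h : digit? c with
    | none =>
      rw [stepA_none acc c h]
      simp only [List.filterMap_cons, h]
      exact ih acc
    | some v =>
      rw [stepA_some acc c v h]
      simp only [List.filterMap_cons, h]
      rw [ih (acc * 64 + v)]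
      simp only [List.length_cons, W]
      ring

-- ===== VERDICT (by name: the statement is the Claim_ definition above) =====
theorem hashToID_spec : Claim_equal_hashToID := by
  intro hash _
  unfold Spec_hashToID hashToID hashToID_alt
  rw [foldl_stepA_eq, revfold_eq, ← W_eq_V_reverse]
  ring
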